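-- pv_equiv track=rewrite | github.com/hamzavdr/clinical-decision-support-mvp | scripts/ingest_from_json.py | map_char_range_to_page_span
-- ===== SOURCE A (Python) =====
-- from typing import Dict, Any, List, Tuple, Iterable, Optional
--
-- def map_char_range_to_page_span(index: List[Tuple[int, int, int]], lo: int, hi: int) -> Tuple[int, int]:
--     """
--     Given a char span [lo, hi) in the concatenated corpus, find the first and last
--     page_number touched by this range using the page index.
--     """
--     page_start = None
--     page_end = None
--     for (pg_no, pg_lo, pg_hi) in index:
--         if pg_hi <= lo:
--             continue
--         if pg_lo >= hi:
--             break
--         # overlap exists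
--         if page_start is None:
--             page_start = pg_no
--         page_end = pg_no
--     # Fallback if somehow not found
--     if page_start is None:
--         page_start = index[0][0]
--     if page_end is None:
--         page_end = index[-1][0]
--     return page_start, page_end
-- ===== SOURCE B (Python) =====
-- def map_char_range_to_page_span(index, lo, hi):
--     """
--     Right-to-left pass: compute, for each suffix of the page index, the span of
--     pages in that suffix that the range [lo, hi) touches.  A page that starts at
--     or after hi cuts off everything behind it; a page ending at or before lo is
--     transparent; an overlapping page extends the span of the suffix behind it.
--     """
--     span = None  # span contributed by the suffix already processed
--     for pg_no, pg_lo, pg_hi in reversed(index):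
--         if pg_hi <= lo:
--             continue                       # page entirely before the range
--         if pg_lo >= hi:
--             span = None                    # range ends before this page
--         else:
--             span = (pg_no, span[1] if span is not None else pg_no)
--     if span is not None:
--         return span
--     return index[0][0], index[-1][0]
-- ===== Notes on version B (the rewrite author's own statement) =====
-- stated objective: alternative
-- what changed: Replaces A's forward scan with continue/break and two Option accumulators by a right-to-left suffix pass that maintains a single optional span (the span each suffix contributes), i.e. the same linear work organised as a backward fold with no early exit; Pre_ excludes only the empty index, on which A raises IndexError.
import Mathlib
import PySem

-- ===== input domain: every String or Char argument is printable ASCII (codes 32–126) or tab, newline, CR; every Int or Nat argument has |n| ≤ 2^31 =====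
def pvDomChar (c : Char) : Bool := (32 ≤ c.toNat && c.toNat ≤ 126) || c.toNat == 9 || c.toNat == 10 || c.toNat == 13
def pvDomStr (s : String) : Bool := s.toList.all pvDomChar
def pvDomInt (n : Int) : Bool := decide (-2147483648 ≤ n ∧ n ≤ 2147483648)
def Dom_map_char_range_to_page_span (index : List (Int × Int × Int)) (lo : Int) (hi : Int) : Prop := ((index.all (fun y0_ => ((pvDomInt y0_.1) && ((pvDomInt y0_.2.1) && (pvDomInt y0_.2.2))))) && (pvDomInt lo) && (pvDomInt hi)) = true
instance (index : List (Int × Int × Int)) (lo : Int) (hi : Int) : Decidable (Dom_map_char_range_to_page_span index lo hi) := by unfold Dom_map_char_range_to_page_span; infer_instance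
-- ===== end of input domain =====

-- B replaces A's forward scan (continue/break, two Option accumulators) by a
-- right-to-left suffix pass maintaining a single optional span; same O(n) cost,
-- a different decomposition with no early exit. Objective: alternative.

-- ===== PORT A =====
-- A's for-loop with `continue`/`break` and the two Option-valued accumulators.
def pvLoopA (lo hi : Int) : List (Int × Int × Int) → Option Int → Option Int → Option Int × Option Int
  | [], ps, pe => (ps, pe)
  | t :: rest, ps, pe =>
    if t.2.2 ≤ lo then pvLoopA lo hi rest ps pe          -- continue
    else if hi ≤ t.2.1 then (ps, pe)                     -- break
    else pvLoopA lo hi rest (if ps.isNone then some t.1 else ps) (some t.1)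

def map_char_range_to_page_span (index : List (Int × Int × Int)) (lo : Int) (hi : Int) : Int × Int :=
  let r := pvLoopA lo hi index none none
  -- fallbacks index[0][0] / index[-1][0]; Python raises IndexError on an empty
  -- index here (excluded by Pre_), the port returns 0 there instead.
  (r.1.getD (((index.head?).map (fun t => t.1)).getD 0),
   r.2.getD (((index.getLast?).map (fun t => t.1)).getD 0))

-- ===== PORT B =====
-- Source B's loop body: one step of the backward pass, updating the suffix span.
def pvStepB (lo hi : Int) (t : Int × Int × Int) (span : Option (Int × Int)) : Option (Int × Int) :=
  if t.2.2 ≤ lo then span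
  else if hi ≤ t.2.1 then none
  else some (t.1, (span.map Prod.snd).getD t.1)

def map_char_range_to_page_span_alt (index : List (Int × Int × Int)) (lo : Int) (hi : Int) : Int × Int :=
  -- `for t in reversed(index): span = step t span` starting from None
  match index.reverse.foldl (fun span t => pvStepB lo hi t span) none with
  | some r => r
  | none => (((index.head?).map (fun t => t.1)).getD 0, ((index.getLast?).map (fun t => t.1)).getD 0)

-- ===== PRECONDITION & SPEC =====
-- Pre_ excludes only the empty index, on which Python A raises IndexError.
def Pre_map_char_range_to_page_span (index : List (Int × Int × Int)) (lo : Int) (hi : Int) : Prop := index ≠ []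
instance (index : List (Int × Int × Int)) (lo : Int) (hi : Int) : Decidable (Pre_map_char_range_to_page_span index lo hi) := by unfold Pre_map_char_range_to_page_span; infer_instance
def pvWitness_map_char_range_to_page_span : (List (Int × Int × Int)) × Int × Int := ([(1, 0, 5), (2, 5, 9)], 3, 7)
def Spec_map_char_range_to_page_span (index : List (Int × Int × Int)) (lo : Int) (hi : Int) (out : Int × Int) : Prop := out = map_char_range_to_page_span_alt index lo hi
instance (index : List (Int × Int × Int)) (lo : Int) (hi : Int) (out : Int × Int) : Decidable (Spec_map_char_range_to_page_span index lo hi out) := by unfold Spec_map_char_range_to_page_span; infer_instance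

-- ===== CLAIM (what is proved, stated in full; the proofs are below) =====
def Claim_equal_map_char_range_to_page_span : Prop := ∀ (index : List (Int × Int × Int)) (lo : Int) (hi : Int), Dom_map_char_range_to_page_span index lo hi → Pre_map_char_range_to_page_span index lo hi → Spec_map_char_range_to_page_span index lo hi (map_char_range_to_page_span index lo hi)

-- ===== LEMMAS AND PROOFS =====
-- B's backward pass, written as a right fold (equal to the foldl over reverse).
def pvSpanB (lo hi : Int) (l : List (Int × Int × Int)) : Option (Int × Int) :=
  l.foldr (fun t span => pvStepB lo hi t span) none

theorem pvSpanB_eq_foldl (lo hi : Int) (l : List (Int × Int × Int)) :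
    l.reverse.foldl (fun span t => pvStepB lo hi t span) none = pvSpanB lo hi l := by
  simp [pvSpanB, List.foldl_reverse]

-- The key invariant: A's loop result, in terms of B's suffix span.
theorem pvLoopA_eq (lo hi : Int) (l : List (Int × Int × Int)) :
    ∀ ps pe : Option Int,
      pvLoopA lo hi l ps pe =
        match pvSpanB lo hi l with
        | none => (ps, pe)
        | some r => (ps.or (some r.1), some r.2) := by
  induction l with
  | nil => intro ps pe; simp [pvLoopA, pvSpanB]
  | cons t rest ih =>
    intro ps pe
    have hspan : pvSpanB lo hi (t :: rest) = pvStepB lo hi t (pvSpanB lo hi rest) := rfl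
    by_cases h1 : t.2.2 ≤ lo
    · rw [hspan]
      simp only [pvLoopA, if_pos h1, pvStepB, if_pos h1, ih]
    · by_cases h2 : hi ≤ t.2.1
      · rw [hspan]
        simp only [pvLoopA, if_neg h1, if_pos h2, pvStepB, if_neg h1, if_pos h2]
      · rw [hspan]
        simp only [pvLoopA, if_neg h1, if_neg h2, pvStepB, ih]
        cases hr : pvSpanB lo hi rest with
        | none => cases ps <;> simp
        | some r => cases ps <;> simp

-- ===== VERDICT (by name: the statement is the Claim_ definition above) =====
theorem map_char_range_to_page_span_spec : Claim_equal_map_char_range_to_page_span := by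
  intro index lo hi _ _
  unfold Spec_map_char_range_to_page_span map_char_range_to_page_span map_char_range_to_page_span_alt
  rw [pvSpanB_eq_foldl, pvLoopA_eq]
  cases h : pvSpanB lo hi index with
  | none => simp
  | some r => simp
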